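-- pv_equiv track=rewrite | github.com/RaeWinTan/SC2001 | LAB2/main.py | genWeirdGraph
-- ===== SOURCE A (Python) =====
-- from collections import defaultdict
--
-- def genWeirdGraph(sz):
--     edges = []
--     ans = sz-1
--     acc = ans+1
--     for a in range(sz-2, -1, -1):
--         for b in range(sz):
--             if a==b: continue
--             elif b==a+1:
--                 edges.append((a,b,1))
--                 continue
--             edges.append((a,b,acc+ans))
--             acc+=1
--         ans+=1
--     hm = defaultdict(list)
--     for (a,b,w) in edges:
--         hm[a].append((b,w))
--     rtn = []
--     for k,v in sorted(hm.items()):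
--         nc = len(v)+1
--         weights = sorted([w for (node,w) in v if node!=k+1], reverse=True)
--         nodes = [node for node in range(nc) if node not in [k+1,k]]
--         tmp = [(nodes[i],weights[i]) for i in range(len(weights))]+[(k+1, 1)]
--         hm[k] = tmp
--         for b,w in tmp: rtn.append((k,b,w))
--     mat = [[float("inf")]*sz for _ in range(sz)]
--     for a,b,w in rtn:
--         mat[a][b] = w
--
--     return rtn
-- ===== SOURCE B (Python) =====
-- def genWeirdGraph(sz):
--     # closed form: one pass, no edge list, no grouping, no sorting
--     rtn = []
--     for k in range(sz - 1):
--         base = sz + (sz - 2 - k) * (sz - 2) + (sz - 1) + (sz - 2 - k)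
--         nodes = [n for n in range(sz) if n != k and n != k + 1]
--         for i, node in enumerate(nodes):
--             rtn.append((k, node, base + (sz - 3) - i))
--         rtn.append((k, k + 1, 1))
--     return rtn
-- ===== Notes on version B (the rewrite author's own statement) =====
-- stated objective: faster
-- what changed: B emits the result directly in one pass using a closed-form weight base per source vertex, eliminating A's edge-list construction, defaultdict grouping, item sorting and per-key weight sorting.
import Mathlib
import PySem

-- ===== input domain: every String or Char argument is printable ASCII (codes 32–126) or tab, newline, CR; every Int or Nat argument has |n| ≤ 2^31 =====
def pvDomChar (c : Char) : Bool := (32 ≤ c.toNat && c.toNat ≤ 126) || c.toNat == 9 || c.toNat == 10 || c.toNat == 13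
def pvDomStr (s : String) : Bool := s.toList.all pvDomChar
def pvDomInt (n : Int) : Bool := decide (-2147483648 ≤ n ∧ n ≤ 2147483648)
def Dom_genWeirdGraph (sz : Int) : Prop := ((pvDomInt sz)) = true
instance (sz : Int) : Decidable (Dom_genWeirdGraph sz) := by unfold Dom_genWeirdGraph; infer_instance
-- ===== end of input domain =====

-- B replaces A's build/group/sort pipeline by a single pass emitting each edge directly
-- from a closed-form weight base per source vertex (objective: faster).

-- ===== PORT A =====
def genWeirdGraph (sz : Int) : List (Int × Int × Int) :=
  -- ans = sz-1; acc = ans+1; nested loops building edges, state ((edges, acc), ans)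
  let st := (PySem.List.pyRange (sz - 2) (-1) (-1)).foldl
    (fun (s : (List (Int × Int × Int) × Int) × Int) a =>
      ((PySem.List.pyRange 0 sz 1).foldl
        (fun (t : List (Int × Int × Int) × Int) b =>
          if b = a then t
          else if b = a + 1 then (t.1 ++ [(a, b, 1)], t.2)
          else (t.1 ++ [(a, b, t.2 + s.2)], t.2 + 1)) s.1,
       s.2 + 1)) (([], (sz - 1) + 1), sz - 1)
  let edges := st.1.1
  -- hm = defaultdict(list); for (a,b,w) in edges: hm[a].append((b,w))
  let hm : PySem.Dict Int (List (Int × Int)) :=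
    edges.foldl (fun d e => d.modify e.1 [] (fun l => l ++ [(e.2.1, e.2.2)])) PySem.Dict.empty
  -- for k,v in sorted(hm.items()):  (exact: the keys are distinct ints, so Python's
  -- tuple comparison on the items decides on the first component alone)
  let st2 := (PySem.List.sorted hm.items (fun p => p.1) false).foldl
    (fun (s : PySem.Dict Int (List (Int × Int)) × List (Int × Int × Int)) kv =>
      let k := kv.1
      let v := kv.2
      let nc : Int := (v.length : Int) + 1
      let weights := PySem.List.sorted ((v.filter (fun p => p.1 ≠ k + 1)).map (fun p => p.2))
          (fun w => w) true
      let nodes := (PySem.List.pyRange 0 nc 1).filter (fun n => ¬ (n = k + 1 ∨ n = k))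
      -- nodes[i] / weights[i]: the indices are provably in range (both lists have
      -- length sz-2), so the default never fires (Python's IndexError is unreachable)
      let tmp := ((PySem.List.pyRange 0 ((weights.length : Int)) 1).map
          (fun i => (PySem.List.pyGetD nodes i 0, PySem.List.pyGetD weights i 0))) ++ [(k + 1, 1)]
      (s.1.insert k tmp, tmp.foldl (fun r p => r ++ [(k, p.1, p.2)]) s.2))
    (hm, [])
  -- the trailing 'mat' block of the Python is write-only dead code (a float matrix that
  -- is never read); it does not affect the return value, so it is omitted here
  st2.2

def genWeirdGraph_alt (sz : Int) : List (Int × Int × Int) :=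
  (PySem.List.pyRange 0 (sz - 1) 1).foldl (fun rtn k =>
    let base := sz + (sz - 2 - k) * (sz - 2) + (sz - 1) + (sz - 2 - k)
    let nodes := (PySem.List.pyRange 0 sz 1).filter (fun n => n ≠ k ∧ n ≠ k + 1)
    ((PySem.List.enumerate nodes 0).foldl
        (fun r p => r ++ [(k, p.2, base + (sz - 3) - p.1)]) rtn) ++ [(k, k + 1, 1)]) []


-- ===== PRECONDITION & SPEC =====
def Spec_genWeirdGraph (sz : Int) (out : List (Int × Int × Int)) : Prop := out = genWeirdGraph_alt sz
instance (sz : Int) (out : List (Int × Int × Int)) : Decidable (Spec_genWeirdGraph sz out) := by unfold Spec_genWeirdGraph; infer_instance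

-- ===== CLAIM (what is proved, stated in full; the proofs are below) =====
def Claim_equal_genWeirdGraph : Prop := ∀ (sz : Int), Dom_genWeirdGraph sz → Spec_genWeirdGraph sz (genWeirdGraph sz)

-- ===== LEMMAS AND PROOFS =====
-- ==== helpers (proofs-only) ====
def pvNodes (sz k : Int) : List Int :=
  (PySem.List.pyRange 0 sz 1).filter (fun n => !(n == k + 1 || n == k))
def pvBase (sz k : Int) : Int := sz + (sz - 2 - k) * (sz - 2) + (sz - 1) + (sz - 2 - k)
def pvBlk (sz k : Int) : List (Int × Int × Int) :=
  (List.range (sz - 2).toNat).map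
    (fun j : Nat => (k, (pvNodes sz k).getD j 0, pvBase sz k + (sz - 3) - (j : Int)))
  ++ [(k, k + 1, 1)]
def pvSpec (sz : Int) : List (Int × Int × Int) :=
  (PySem.List.pyRange 0 (sz - 1) 1).flatMap (pvBlk sz)

theorem pv_filter_one_length (l : List Int) (hl : l.Nodup) (x : Int) (hx : x ∈ l) :
    (l.filter (fun b => !(b == x))).length = l.length - 1 := by
  have h1 : l.length = (l.filter (fun b => (b == x))).length + (l.filter (fun b => !(b == x))).length :=
    List.length_eq_length_filter_add (fun b => (b == x))
  have h2 : (l.filter (fun b => (b == x))).length = 1 := by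
    have := List.count_eq_one_of_mem hl hx
    simpa [List.count_eq_length_filter] using this
  omega

theorem pv_filter_two_length (l : List Int) (hl : l.Nodup) (x y : Int)
    (hx : x ∈ l) (hy : y ∈ l) (hxy : x ≠ y) :
    (l.filter (fun b => !(b == x || b == y))).length = l.length - 2 := by
  have hsplit : l.filter (fun b => !(b == x || b == y)) = (l.filter (fun b => !(b == x))).filter (fun b => !(b == y)) := by
    rw [List.filter_filter]
    apply List.filter_congr
    intro b _
    cases hb : (b == x) <;> cases hb2 : (b == y) <;> simp [hb, hb2]
  rw [hsplit]
  have hy' : y ∈ l.filter (fun b => !(b == x)) := by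
    simp only [List.mem_filter, Bool.not_eq_true', beq_eq_false_iff_ne]
    exact ⟨hy, Ne.symm hxy⟩
  have h2 := pv_filter_one_length _ (hl.filter _) y hy'
  rw [h2, pv_filter_one_length l hl x hx]
  omega

theorem pv_nodes_len (sz k : Int) (h2 : 2 ≤ sz) (h0 : 0 ≤ k) (h1 : k < sz - 1) :
    (pvNodes sz k).length = (sz - 2).toNat := by
  unfold pvNodes
  rw [pv_filter_two_length _ (PySem.List.nodup_pyRange_one 0 sz) (k + 1) k
    (by rw [PySem.List.mem_pyRange_one]; omega)
    (by rw [PySem.List.mem_pyRange_one]; omega) (by omega)]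
  rw [PySem.List.length_pyRange_one]
  omega

theorem pvB_eq (sz : Int) : genWeirdGraph_alt sz = pvSpec sz := by
  simp only [genWeirdGraph_alt, pvSpec]
  rw [PySem.List.foldl_congr_mem _ _ (fun rtn k => rtn ++ pvBlk sz k) _ ?_]
  · rw [PySem.List.foldl_append_eq_flatMap, List.nil_append]
  · intro acc k hk
    rw [PySem.List.mem_pyRange_one] at hk
    have hfc : (PySem.List.pyRange 0 sz 1).filter (fun n => n ≠ k ∧ n ≠ k + 1) = pvNodes sz k := by
      apply List.filter_congr
      intro n _
      by_cases ha : n = k <;> by_cases hb : n = k + 1 <;> simp [pvNodes, ha, hb]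
    rw [hfc]
    rw [PySem.List.enumerate_eq_map_pyRange (pvNodes sz k) 0]
    rw [List.foldl_map]
    rw [PySem.List.foldl_append_singleton_eq_map
      (fun j => (k, PySem.List.pyGetD (pvNodes sz k) j 0, (sz + (sz - 2 - k) * (sz - 2) + (sz - 1) + (sz - 2 - k)) + (sz - 3) - j))]
    rw [List.append_assoc]
    unfold pvBlk
    congr 1
    rw [PySem.List.pyRange_one, List.map_map]
    have hlen : (PySem.List.len (pvNodes sz k) - 0).toNat = (sz - 2).toNat := by
      have := pv_nodes_len sz k (by omega) hk.1 hk.2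
      simp [PySem.List.len, this]
      omega
    rw [hlen]
    congr 1
    apply List.map_congr_left
    intro j hj
    rw [List.mem_range] at hj
    simp only [Function.comp, zero_add, PySem.List.pyGetD_natCast]
    rfl

-- ==== phase-1 machinery ====
def pvRow (a ans : Int) : Int → List Int → List (Int × Int × Int)
  | _, [] => []
  | acc, b :: bs =>
      if b = a then pvRow a ans acc bs
      else if b = a + 1 then (a, b, 1) :: pvRow a ans acc bs
      else (a, b, acc + ans) :: pvRow a ans (acc + 1) bs

def pvC (sz a : Int) : Nat :=
  ((PySem.List.pyRange 0 sz 1).filter (fun b => !(b == a || b == a + 1))).length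

def pvRows (sz : Int) : List Int → Int → Int → List (Int × Int × Int) × Int
  | [], acc, _ => ([], acc)
  | a :: as, acc, ans =>
      let r := pvRows sz as (acc + (pvC sz a : Int)) (ans + 1)
      (pvRow a ans acc (PySem.List.pyRange 0 sz 1) ++ r.1, r.2)

theorem pvRow_foldl (a ans : Int) (bs : List Int) : ∀ (es : List (Int × Int × Int)) (acc : Int),
    bs.foldl (fun (t : List (Int × Int × Int) × Int) b =>
        if b = a then t
        else if b = a + 1 then (t.1 ++ [(a, b, 1)], t.2)
        else (t.1 ++ [(a, b, t.2 + ans)], t.2 + 1)) (es, acc)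
      = (es ++ pvRow a ans acc bs,
         acc + ((bs.filter (fun b => !(b == a || b == a + 1))).length : Int)) := by
  induction bs with
  | nil => intro es acc; simp [pvRow]
  | cons b bs ih =>
    intro es acc
    by_cases h1 : b = a
    · simp [pvRow, h1, ih]
    · by_cases h2 : b = a + 1
      · simp [pvRow, h1, h2, ih]
      · simp only [List.foldl_cons, List.filter_cons, pvRow, if_neg h1, if_neg h2, ih]
        simp [h1, h2]
        omega

theorem pvRows_foldl (sz : Int) (as : List Int) : ∀ (es : List (Int × Int × Int)) (acc ans : Int),
    as.foldl (fun (s : (List (Int × Int × Int) × Int) × Int) a =>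
        ((PySem.List.pyRange 0 sz 1).foldl
          (fun (t : List (Int × Int × Int) × Int) b =>
            if b = a then t
            else if b = a + 1 then (t.1 ++ [(a, b, 1)], t.2)
            else (t.1 ++ [(a, b, t.2 + s.2)], t.2 + 1)) s.1,
         s.2 + 1)) ((es, acc), ans)
      = ((es ++ (pvRows sz as acc ans).1, (pvRows sz as acc ans).2), ans + as.length) := by
  induction as with
  | nil => intro es acc ans; simp [pvRows]
  | cons a as ih =>
    intro es acc ans
    simp only [List.foldl_cons]
    rw [pvRow_foldl a ans (PySem.List.pyRange 0 sz 1) es acc]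
    rw [ih]
    simp only [pvRows, pvC, List.length_cons]
    rw [Prod.mk.injEq, Prod.mk.injEq]
    refine ⟨⟨by simp, rfl⟩, by push_cast; ring⟩

theorem pvRow_mem_key (a ans : Int) (bs : List Int) : ∀ (acc : Int),
    ∀ e ∈ pvRow a ans acc bs, e.1 = a := by
  induction bs with
  | nil => intro acc e he; simp [pvRow] at he
  | cons b bs ih =>
    intro acc e he
    by_cases h1 : b = a
    · exact ih acc e (by simpa [pvRow, h1] using he)
    · by_cases h2 : b = a + 1
      · rcases (by simpa [pvRow, h1, h2] using he : e = (a, b, 1) ∨ e ∈ pvRow a ans acc bs) with h | h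
        · simp [h]
        · exact ih acc e h
      · rcases (by simpa [pvRow, h1, h2] using he : e = (a, b, acc + ans) ∨ e ∈ pvRow a ans (acc + 1) bs) with h | h
        · simp [h]
        · exact ih _ e h

theorem pvRow_length (a ans : Int) (bs : List Int) : ∀ (acc : Int),
    (pvRow a ans acc bs).length = (bs.filter (fun b => !(b == a))).length := by
  induction bs with
  | nil => intro acc; simp [pvRow]
  | cons b bs ih =>
    intro acc
    by_cases h1 : b = a
    · simp [pvRow, h1, ih]
    · by_cases h2 : b = a + 1 <;> simp [pvRow, h1, h2, ih]

theorem pvRow_light_mem (a ans : Int) (bs : List Int) (h : a + 1 ∈ bs) : ∀ (acc : Int),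
    (a, a + 1, 1) ∈ pvRow a ans acc bs := by
  induction bs with
  | nil => simp at h
  | cons b bs ih =>
    intro acc
    by_cases h1 : b = a
    · have hb : a + 1 ∈ bs := by
        rcases List.mem_cons.1 h with h' | h'
        · omega
        · exact h'
      simp [pvRow, h1, ih hb]
    · by_cases h2 : b = a + 1
      · simp [pvRow, h1, h2]
      · have hb : a + 1 ∈ bs := by
          rcases List.mem_cons.1 h with h' | h'
          · exact absurd h'.symm h2
          · exact h'
        simp [pvRow, h1, h2, ih hb]

theorem pvRow_weights (a ans : Int) (bs : List Int) : ∀ (acc : Int),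
    ((pvRow a ans acc bs).filter (fun e => !(e.2.1 == a + 1))).map (fun e => e.2.2)
      = (List.range ((bs.filter (fun b => !(b == a || b == a + 1))).length)).map
          (fun i : Nat => acc + ans + (i : Int)) := by
  induction bs with
  | nil => intro acc; simp [pvRow]
  | cons b bs ih =>
    intro acc
    by_cases h1 : b = a
    · have hc : (!(b == a || b == a + 1)) = false := by simp [h1]
      simp only [pvRow, if_pos h1, List.filter_cons, hc]
      exact ih acc
    · by_cases h2 : b = a + 1
      · have hc : (!(b == a || b == a + 1)) = false := by simp [h2]
        have hc2 : (!(((a, b, (1:Int)).2.1) == a + 1)) = false := by simp [h2]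
        simp only [pvRow, if_neg h1, if_pos h2, List.filter_cons, hc, hc2]
        exact ih acc
      · have hc : (!(b == a || b == a + 1)) = true := by simp [h1, h2]
        have hc2 : (!(((a, b, acc + ans).2.1) == a + 1)) = true := by simp [h2]
        simp only [pvRow, if_neg h1, if_neg h2, List.filter_cons, hc, hc2, if_true,
          List.map_cons, List.length_cons, ih]
        rw [List.range_succ_eq_map]
        rw [List.map_cons, List.map_map]
        refine congrArg₂ _ (by simp) ?_
        apply List.map_congr_left
        intro i _
        simp [Function.comp]
        push_cast
        ring

theorem pvRows_mem_key (sz : Int) (as : List Int) : ∀ (acc ans : Int),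
    ∀ e ∈ (pvRows sz as acc ans).1, e.1 ∈ as := by
  induction as with
  | nil => intro acc ans e he; simp [pvRows] at he
  | cons a as ih =>
    intro acc ans e he
    rcases List.mem_append.1 (by simpa [pvRows] using he) with h | h
    · exact List.mem_cons.2 (Or.inl (pvRow_mem_key a ans _ acc e h))
    · exact List.mem_cons.2 (Or.inr (ih _ _ e h))

theorem pvRows_key_exists (sz : Int) (as : List Int) : ∀ (acc ans a : Int), a ∈ as →
    0 ≤ a → a ≤ sz - 2 → ∃ e ∈ (pvRows sz as acc ans).1, e.1 = a := by
  induction as with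
  | nil => intro acc ans a ha; simp at ha
  | cons b as ih =>
    intro acc ans a ha h0 h1
    rcases List.mem_cons.1 ha with h | h
    · subst h
      refine ⟨(a, a + 1, 1), ?_, rfl⟩
      simp only [pvRows, List.mem_append]
      exact Or.inl (pvRow_light_mem a ans _ (by rw [PySem.List.mem_pyRange_one]; omega) acc)
    · obtain ⟨e, he, hk⟩ := ih (acc + (pvC sz b : Int)) (ans + 1) a h h0 h1
      exact ⟨e, by simp only [pvRows, List.mem_append]; exact Or.inr he, hk⟩

theorem pvC_eq (sz a : Int) (h0 : 0 ≤ a) (h2 : a ≤ sz - 2) : pvC sz a = (sz - 2).toNat := by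
  unfold pvC
  have hsplit : ∀ b : Int, (!(b == a || b == a + 1)) = (!(b == a + 1 || b == a)) := by
    intro b; cases hb : (b == a) <;> cases hb2 : (b == a + 1) <;> simp [hb, hb2]
  rw [List.filter_congr (fun b _ => hsplit b)]
  rw [pv_filter_two_length _ (PySem.List.nodup_pyRange_one 0 sz) (a + 1) a
    (by rw [PySem.List.mem_pyRange_one]; omega)
    (by rw [PySem.List.mem_pyRange_one]; omega) (by omega)]
  rw [PySem.List.length_pyRange_one]
  omega

theorem pv_range_succ_map_down (m : Int) (n : Nat) :
    (List.range (n + 1)).map (fun j : Nat => m - (j : Int))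
      = m :: (List.range n).map (fun j : Nat => (m - 1) - (j : Int)) := by
  rw [List.range_succ_eq_map, List.map_cons, List.map_map]
  refine congrArg₂ _ (by simp) (List.map_congr_left ?_)
  intro j _
  simp [Function.comp]
  push_cast
  ring

theorem pv_pyRange_down (m : Int) :
    PySem.List.pyRange m (-1) (-1) = (List.range (m + 1).toNat).map (fun j : Nat => m - (j : Int)) := by
  simp only [PySem.List.pyRange]
  norm_num
  by_cases h : -1 < m
  · rw [if_pos h]
    apply List.map_congr_left
    intro j _
    ring
  · rw [if_neg h]
    have : (m + 1).toNat = 0 := by omega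
    simp [this]

theorem pvRows_filter (sz : Int) (n : Nat) : ∀ (m k acc ans : Int), 0 ≤ k → k ≤ m →
    m - k < (n : Int) → m ≤ sz - 2 →
    ((pvRows sz ((List.range n).map (fun j : Nat => m - (j : Int))) acc ans).1.filter
        (fun e => e.1 == k))
      = pvRow k (ans + (m - k)) (acc + (m - k) * (sz - 2)) (PySem.List.pyRange 0 sz 1) := by
  induction n with
  | zero => intro m k acc ans h0 h1 h2 h3; omega
  | succ n ih =>
    intro m k acc ans h0 h1 h2 h3
    rw [pv_range_succ_map_down]
    simp only [pvRows]
    rw [List.filter_append]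
    by_cases hk : k = m
    · subst hk
      have hrow : (pvRow k ans acc (PySem.List.pyRange 0 sz 1)).filter (fun e => e.1 == k)
          = pvRow k ans acc (PySem.List.pyRange 0 sz 1) := by
        apply List.filter_eq_self.2
        intro e he
        simpa using pvRow_mem_key k ans _ acc e he
      have hrest : ((pvRows sz ((List.range n).map (fun j : Nat => (k - 1) - (j : Int)))
            (acc + (pvC sz k : Int)) (ans + 1)).1.filter (fun e => e.1 == k)) = [] := by
        apply List.filter_eq_nil_iff.2
        intro e he
        have := pvRows_mem_key sz _ _ _ e he
        simp only [List.mem_map, List.mem_range] at this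
        obtain ⟨j, _, hj⟩ := this
        simp only [beq_iff_eq, ← hj]
        omega
      rw [hrow, hrest]
      have e1 : ans + (k - k) = ans := by ring
      have e2 : acc + (k - k) * (sz - 2) = acc := by ring
      rw [e1, e2, List.append_nil]
    · have hrowne : (pvRow m ans acc (PySem.List.pyRange 0 sz 1)).filter (fun e => e.1 == k) = [] := by
        apply List.filter_eq_nil_iff.2
        intro e he
        have := pvRow_mem_key m ans _ acc e he
        simp only [beq_iff_eq, this]
        omega
      rw [hrowne]
      rw [ih (m - 1) k (acc + (pvC sz m : Int)) (ans + 1) h0 (by omega) (by omega) (by omega)]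
      rw [pvC_eq sz m (by omega) h3]
      have hc : ((sz - 2).toNat : Int) = sz - 2 := by omega
      rw [hc]
      have e1 : ans + 1 + (m - 1 - k) = ans + (m - k) := by ring
      have e2 : acc + (sz - 2) + (m - 1 - k) * (sz - 2) = acc + (m - k) * (sz - 2) := by ring
      rw [e1, e2]
      simp

-- second component of A's output loop
theorem pv_snd_fold (l : List (Int × List (Int × Int))) (t : (Int × List (Int × Int)) → List (Int × Int)) :
    ∀ (d : PySem.Dict Int (List (Int × Int))) (r : List (Int × Int × Int)),
    (l.foldl (fun s kv =>
        (s.1.insert kv.1 (t kv), (t kv).foldl (fun rr p => rr ++ [(kv.1, p.1, p.2)]) s.2)) (d, r)).2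
      = r ++ l.flatMap (fun kv => (t kv).map (fun p => (kv.1, p.1, p.2))) := by
  induction l with
  | nil => intro d r; simp
  | cons kv l ih =>
    intro d r
    simp only [List.foldl_cons, List.flatMap_cons]
    rw [ih]
    rw [PySem.List.foldl_append_singleton_eq_map (fun p : Int × Int => (kv.1, p.1, p.2))]
    simp [List.append_assoc]


theorem pvTMP (sz k : Int) (hsz : 2 ≤ sz) (h0 : 0 ≤ k) (h1 : k < sz - 1) :
    (let v := (pvRow k ((sz - 1) + (sz - 2 - k)) (((sz - 1) + 1) + (sz - 2 - k) * (sz - 2))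
        (PySem.List.pyRange 0 sz 1)).map (fun e => (e.2.1, e.2.2))
     let weights := PySem.List.sorted ((v.filter (fun p => p.1 ≠ k + 1)).map (fun p => p.2))
        (fun w => w) true
     let nodes := (PySem.List.pyRange 0 ((v.length : Int) + 1) 1).filter
        (fun n => ¬ (n = k + 1 ∨ n = k))
     (((PySem.List.pyRange 0 ((weights.length : Int)) 1).map
        (fun i => (PySem.List.pyGetD nodes i 0, PySem.List.pyGetD weights i 0))) ++ [(k + 1, 1)]).map
          (fun p : Int × Int => (k, p.1, p.2)))
      = pvBlk sz k := by
  have hnd := PySem.List.nodup_pyRange_one 0 sz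
  have hkmem : k ∈ PySem.List.pyRange 0 sz 1 := by rw [PySem.List.mem_pyRange_one]; omega
  simp only []
  set A := ((sz - 1) + 1) + (sz - 2 - k) * (sz - 2) with hA
  set N := ((sz - 1) + (sz - 2 - k)) with hN
  set v := (pvRow k N A (PySem.List.pyRange 0 sz 1)).map
    (fun e : Int × Int × Int => (e.2.1, e.2.2)) with hv
  have hW0 : (v.filter (fun p => p.1 ≠ k + 1)).map (fun p => p.2)
      = (List.range ((sz - 2).toNat)).map (fun i : Nat => A + N + (i : Int)) := by
    rw [hv, List.filter_map]
    have hco : ((fun p : Int × Int => decide (p.1 ≠ k + 1)) ∘ (fun e : Int × Int × Int => (e.2.1, e.2.2)))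
        = fun e : Int × Int × Int => decide (e.2.1 ≠ k + 1) := rfl
    rw [hco]
    rw [List.filter_congr (fun (e : Int × Int × Int) _ =>
      (by cases h : (e.2.1 == k + 1) <;> simp_all :
        decide (e.2.1 ≠ k + 1) = !(e.2.1 == k + 1)))]
    rw [List.map_map]
    have hmm : ((fun p : Int × Int => p.2) ∘ (fun e : Int × Int × Int => (e.2.1, e.2.2)))
        = fun e : Int × Int × Int => e.2.2 := rfl
    rw [hmm]
    rw [pvRow_weights]
    have : ((PySem.List.pyRange 0 sz 1).filter (fun b => !(b == k || b == k + 1))).length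
        = (sz - 2).toNat := pvC_eq sz k h0 (by omega)
    rw [this]
  have hW : PySem.List.sorted ((v.filter (fun p => p.1 ≠ k + 1)).map (fun p => p.2)) (fun w => w) true
      = ((List.range ((sz - 2).toNat)).map (fun i : Nat => A + N + (i : Int))).reverse := by
    apply PySem.List.sorted_rev_eq_of_perm_of_pairwise_gt
    · rw [hW0]; exact List.reverse_perm _
    · rw [List.pairwise_reverse]
      exact List.Pairwise.map _ (fun a b h => by omega) List.pairwise_lt_range
  have hWlen : ((PySem.List.sorted ((v.filter (fun p => p.1 ≠ k + 1)).map (fun p => p.2))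
      (fun w => w) true).length : Int) = ((sz - 2).toNat : Int) := by
    rw [hW]; simp
  have hvlen : (v.length : Int) + 1 = sz := by
    rw [hv, List.length_map, pvRow_length]
    rw [pv_filter_one_length _ hnd k hkmem]
    rw [PySem.List.length_pyRange_one]
    omega
  rw [hvlen, hWlen, hW]
  have hnodes : (PySem.List.pyRange 0 sz 1).filter (fun n => ¬ (n = k + 1 ∨ n = k)) = pvNodes sz k := by
    apply List.filter_congr
    intro n _
    by_cases ha : n = k + 1 <;> by_cases hb : n = k <;> simp [pvNodes, ha, hb]
  rw [hnodes]
  rw [PySem.List.pyRange_one 0 ((sz - 2).toNat : Int)]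
  rw [List.map_map, List.map_append, List.map_map]
  unfold pvBlk
  simp only [Int.sub_zero, Int.toNat_natCast]
  congr 1
  apply List.map_congr_left
  intro j hj
  rw [List.mem_range] at hj
  have hrevlen : ((List.range ((sz - 2).toNat)).map (fun i : Nat => A + N + (i : Int))).length
      = (sz - 2).toNat := by simp
  simp only [Function.comp, zero_add, PySem.List.pyGetD_natCast]
  have hgd : (((List.range ((sz - 2).toNat)).map (fun i : Nat => A + N + (i : Int))).reverse).getD j 0
      = A + N + ((sz - 2).toNat - 1 - j : Nat) := by
    rw [List.getD_eq_getElem _ _ (by simp [hj])]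
    rw [List.getElem_reverse]
    rw [List.getElem_map]
    rw [List.getElem_range]
    rw [hrevlen]
  rw [hgd]
  have hbase : A + N = pvBase sz k := by rw [hA, hN]; unfold pvBase; ring
  rw [Prod.mk.injEq, Prod.mk.injEq]
  refine ⟨rfl, rfl, ?_⟩
  rw [hbase]
  omega

theorem pvA_eq (sz : Int) (hsz : 2 ≤ sz) : genWeirdGraph sz = pvSpec sz := by
  simp only [genWeirdGraph]
  rw [pv_pyRange_down (sz - 2)]
  have hn : (sz - 2 + 1).toNat = (sz - 1).toNat := by omega
  rw [hn]
  rw [pvRows_foldl sz ((List.range (sz - 1).toNat).map (fun j : Nat => (sz - 2) - (j : Int)))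
      [] ((sz - 1) + 1) (sz - 1)]
  simp only [List.nil_append]
  set E : List (Int × Int × Int) :=
    (pvRows sz ((List.range (sz - 1).toNat).map (fun j : Nat => (sz - 2) - (j : Int)))
      ((sz - 1) + 1) (sz - 1)).1 with hE
  -- grouping loop over triples = grouping loop over (key, pair) images
  have hgroup : E.foldl (fun d e => d.modify e.1 [] (fun l => l ++ [(e.2.1, e.2.2)])) PySem.Dict.empty
      = (E.map (fun e => (e.1, (e.2.1, e.2.2)))).foldl
          (fun d p => d.modify p.1 [] (fun x => x ++ [p.2])) PySem.Dict.empty := by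
    rw [List.foldl_map]
  rw [hgroup]
  set HM : PySem.Dict Int (List (Int × Int)) :=
    (E.map (fun e => (e.1, (e.2.1, e.2.2)))).foldl
      (fun d p => d.modify p.1 [] (fun x => x ++ [p.2])) PySem.Dict.empty with hHM
  have hnodup : HM.keys.Nodup := by
    rw [hHM]
    exact PySem.Dict.nodup_keys_foldl_modify_key _ (fun p : Int × (Int × Int) => p.1) []
      (fun (_ : PySem.Dict Int (List (Int × Int))) (p : Int × (Int × Int)) => fun x => x ++ [p.2])
      PySem.Dict.empty (by simp [PySem.Dict.empty])
  have hkeys : HM.keys = PySem.Set.ofList (E.map (fun e => e.1)) := by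
    rw [hHM]
    rw [PySem.Dict.keys_foldl_modify_key _ (fun p : Int × (Int × Int) => p.1) []
      (fun (_ : PySem.Dict Int (List (Int × Int))) (p : Int × (Int × Int)) => fun x => x ++ [p.2])]
    rw [List.map_map]
    rfl
  have hkmem : ∀ x, x ∈ HM.keys ↔ (0 ≤ x ∧ x ≤ sz - 2) := by
    intro x
    rw [hkeys, PySem.Set.mem_ofList]
    constructor
    · intro hx
      obtain ⟨e, he, hex⟩ := List.mem_map.1 hx
      have := pvRows_mem_key sz _ _ _ e he
      simp only [List.mem_map, List.mem_range] at this
      obtain ⟨j, hj, hje⟩ := this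
      omega
    · intro ⟨h0, h1⟩
      have hmem : x ∈ (List.range (sz - 1).toNat).map (fun j : Nat => (sz - 2) - (j : Int)) := by
        simp only [List.mem_map, List.mem_range]
        exact ⟨(sz - 2 - x).toNat, by omega, by omega⟩
      obtain ⟨e, he, hex⟩ := pvRows_key_exists sz _ _ _ x hmem h0 h1
      exact List.mem_map.2 ⟨e, he, hex⟩
  have hperm : HM.keys.Perm (PySem.List.pyRange 0 (sz - 1) 1) := by
    rw [List.perm_ext_iff_of_nodup hnodup (PySem.List.nodup_pyRange_one 0 (sz - 1))]
    intro x
    rw [hkmem, PySem.List.mem_pyRange_one]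
    omega
  have hsorted : PySem.List.sorted HM.items (fun p => p.1) false
      = (PySem.List.pyRange 0 (sz - 1) 1).map (fun k => (k, HM.getD k [])) := by
    apply PySem.List.sorted_eq_of_perm_of_pairwise_lt
    · rw [PySem.Dict.items_eq_map_keys HM hnodup []]
      exact (hperm.map _).symm
    · exact List.Pairwise.map _ (fun a b h => h) (PySem.List.pairwise_lt_pyRange_one 0 (sz - 1))
  rw [hsorted]
  -- the value stored at key k
  have hV : ∀ k : Int, 0 ≤ k → k ≤ sz - 2 → HM.getD k []
      = (pvRow k ((sz - 1) + (sz - 2 - k)) (((sz - 1) + 1) + (sz - 2 - k) * (sz - 2))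
          (PySem.List.pyRange 0 sz 1)).map (fun e => (e.2.1, e.2.2)) := by
    intro k h0 h1
    rw [hHM]
    rw [PySem.Dict.getD_foldl_modify_append (List.map (fun e => (e.1, e.2.1, e.2.2)) E)
      PySem.Dict.empty k]
    rw [PySem.Dict.getD_empty, List.nil_append]
    rw [List.filter_map]
    have hco : ((fun p : Int × (Int × Int) => p.1 == k) ∘ (fun e : Int × Int × Int => (e.1, e.2.1, e.2.2)))
        = (fun e : Int × Int × Int => e.1 == k) := rfl
    rw [hco, List.map_map]
    rw [hE]
    rw [pvRows_filter sz ((sz - 1).toNat) (sz - 2) k ((sz - 1) + 1) (sz - 1) h0 h1 (by omega) (by omega)]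
    rfl
  rw [pv_snd_fold]
  rw [List.nil_append]
  rw [List.flatMap_map]
  unfold pvSpec
  apply List.flatMap_congr
  intro k hk
  rw [PySem.List.mem_pyRange_one] at hk
  simp only []
  rw [hV k hk.1 (by omega)]
  exact pvTMP sz k hsz hk.1 hk.2

theorem pvA_small (sz : Int) (h : sz ≤ 1) : genWeirdGraph sz = [] := by
  simp only [genWeirdGraph]
  rw [pv_pyRange_down (sz - 2)]
  have h0 : (sz - 2 + 1).toNat = 0 := by omega
  rw [h0]
  rfl

theorem pv_main (sz : Int) : genWeirdGraph sz = genWeirdGraph_alt sz := by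
  by_cases h : sz ≤ 1
  · rw [pvA_small sz h, pvB_eq]
    unfold pvSpec
    rw [PySem.List.pyRange_one]
    have h0 : (sz - 1 - 0).toNat = 0 := by omega
    rw [h0]
    rfl
  · rw [pvA_eq sz (by omega), pvB_eq]

-- ===== VERDICT (by name: the statement is the Claim_ definition above) =====
theorem genWeirdGraph_spec : Claim_equal_genWeirdGraph := by
  intro sz _
  unfold Spec_genWeirdGraph
  exact pv_main sz
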